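-- pv_equiv track=rewrite | github.com/Stridd/Environment_2048 | Environment/Utility.py | get_max_cell_value_and_count_from_board
-- ===== SOURCE A (Python) =====
-- def get_max_cell_value_and_count_from_board(board):
--     max_cell = None
--     max_cell_count = 0
--     for i in range(len(board)):
--         for j in range(len(board)):
--             if max_cell is None or max_cell < board[i][j]:
--                 max_cell = board[i][j]
--                 max_cell_count = 1
--             elif max_cell == board[i][j]:
--                 max_cell_count +=1
--
--     return max_cell, max_cell_count
-- ===== SOURCE B (Python) =====
-- def get_max_cell_value_and_count_from_board(board):
--     n = len(board)
--     cells = [board[i][j] for i in range(n) for j in range(n)]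
--     if not cells:
--         return None, 0
--     m = max(cells)
--     return m, cells.count(m)
-- ===== Notes on version B (the rewrite author's own statement) =====
-- stated objective: simpler
-- what changed: Replaces A's fused single-pass running-max-with-count accumulator by a flatten-then-max-then-count decomposition (three plain passes: build the cell list, take max, count it).
import Mathlib
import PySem

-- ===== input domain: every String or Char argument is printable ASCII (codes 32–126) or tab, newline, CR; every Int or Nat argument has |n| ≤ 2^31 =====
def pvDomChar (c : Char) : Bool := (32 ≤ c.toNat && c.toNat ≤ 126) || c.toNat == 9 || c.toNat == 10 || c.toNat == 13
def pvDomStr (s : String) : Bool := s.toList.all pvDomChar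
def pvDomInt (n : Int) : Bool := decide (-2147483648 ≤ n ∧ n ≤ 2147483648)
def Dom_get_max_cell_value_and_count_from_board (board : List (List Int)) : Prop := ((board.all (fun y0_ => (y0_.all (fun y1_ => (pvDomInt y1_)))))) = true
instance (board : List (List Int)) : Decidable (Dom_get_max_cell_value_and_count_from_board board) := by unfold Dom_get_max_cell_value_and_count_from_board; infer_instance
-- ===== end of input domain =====

-- B replaces A's fused running-max-with-count loop by flatten / max / count, for simplicity (same cost).

-- ===== PORT A =====
-- the loop body of A: update (max_cell, max_cell_count) with one cell value
def pvStepA (st : Option Int × Int) (v : Int) : Option Int × Int :=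
  match st with
  | (none, _) => (some v, 1)
  | (some m, c) => if m < v then (some v, 1) else if m = v then (some m, c + 1) else (some m, c)

-- board[i][j] is ported as getD with default; exact on Pre_ (both indices in range there)
def get_max_cell_value_and_count_from_board (board : List (List Int)) : Option Int × Int :=
  (List.range board.length).foldl (fun st i =>
    (List.range board.length).foldl (fun st j =>
      pvStepA st ((board.getD i []).getD j 0)) st) (none, 0)

-- ===== PORT B =====
def get_max_cell_value_and_count_from_board_alt (board : List (List Int)) : Option Int × Int :=
  let n := board.length
  let cells := (List.range n).flatMap (fun i => (List.range n).map (fun j => (board.getD i []).getD j 0))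
  match PySem.List.max? cells (fun x => x) with
  | none => (none, 0)
  | some m => (some m, (PySem.List.count cells m : Int))

-- ===== PRECONDITION & SPEC =====
-- Pre_ excludes exactly the boards where Python A raises IndexError (a row shorter than the board);
-- B raises there too (same square indexing).
def Pre_get_max_cell_value_and_count_from_board (board : List (List Int)) : Prop :=
  ∀ row ∈ board, board.length ≤ row.length
instance (board : List (List Int)) : Decidable (Pre_get_max_cell_value_and_count_from_board board) := by unfold Pre_get_max_cell_value_and_count_from_board; infer_instance

def pvWitness_get_max_cell_value_and_count_from_board : List (List Int) := [[2, 1], [3, 3]]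

def Spec_get_max_cell_value_and_count_from_board (board : List (List Int)) (out : Option Int × Int) : Prop := out = get_max_cell_value_and_count_from_board_alt board
instance (board : List (List Int)) (out : Option Int × Int) : Decidable (Spec_get_max_cell_value_and_count_from_board board out) := by unfold Spec_get_max_cell_value_and_count_from_board; infer_instance

-- ===== CLAIM (what is proved, stated in full; the proofs are below) =====
def Claim_equal_get_max_cell_value_and_count_from_board : Prop := ∀ (board : List (List Int)), Dom_get_max_cell_value_and_count_from_board board → Pre_get_max_cell_value_and_count_from_board board → Spec_get_max_cell_value_and_count_from_board board (get_max_cell_value_and_count_from_board board)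

-- ===== LEMMAS AND PROOFS =====

-- after starting from (some m, c), folding A's step over t yields the running max together with
-- the right count: c + occurrences of m if m stays maximal, else the count of the new max in t.
theorem pvStepA_foldl_some (t : List Int) : ∀ (m : Int) (c : Int),
    t.foldl pvStepA (some m, c) =
      (some (t.foldl max m),
       if t.foldl max m = m then c + (t.count m : Int) else (t.count (t.foldl max m) : Int)) := by
  induction t with
  | nil => intro m c; simp
  | cons x t ih =>
    intro m c
    simp only [List.foldl_cons, pvStepA, List.count_cons]
    rcases lt_trichotomy m x with h | h | h
    · rw [if_pos h, ih x 1, max_eq_right h.le]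
      have hle : x ≤ t.foldl max x := (PySem.List.le_foldl_max t x).1
      by_cases h1 : t.foldl max x = x
      · rw [if_pos h1, if_neg (by omega), h1]
        simp
        omega
      · rw [if_neg h1, if_neg (by omega)]
        have hxm : (x == t.foldl max x) = false := beq_false_of_ne (by omega)
        rw [hxm]
        simp
    · subst h
      rw [if_neg (lt_irrefl m), if_pos rfl, ih m (c + 1), max_self]
      have hle : m ≤ t.foldl max m := (PySem.List.le_foldl_max t m).1
      by_cases h1 : t.foldl max m = m
      · rw [if_pos h1, if_pos h1, h1]
        simp
        ring
      · rw [if_neg h1, if_neg h1]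
        have hxm : (m == t.foldl max m) = false := beq_false_of_ne (by omega)
        rw [hxm]
        simp
    · rw [if_neg (by omega), if_neg (by omega), ih m c, max_eq_left h.le]
      have hle : m ≤ t.foldl max m := (PySem.List.le_foldl_max t m).1
      by_cases h1 : t.foldl max m = m
      · rw [if_pos h1, if_pos h1]
        have hxm : (x == m) = false := beq_false_of_ne (by omega)
        rw [hxm]
        simp
      · rw [if_neg h1, if_neg h1]
        have hxm : (x == t.foldl max m) = false := beq_false_of_ne (by omega)
        rw [hxm]
        simp

-- A's whole accumulation over any cell list equals B's max-then-count reading of it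
theorem pvStepA_foldl (cells : List Int) :
    cells.foldl pvStepA (none, 0) =
      (match PySem.List.max? cells (fun x => x) with
       | none => (none, 0)
       | some m => (some m, (cells.count m : Int))) := by
  cases cells with
  | nil => simp [PySem.List.max?]
  | cons x t =>
    rw [PySem.List.max?_id_cons]
    simp only [List.foldl_cons]
    show t.foldl pvStepA (some x, 1) = _
    rw [pvStepA_foldl_some t x 1, List.count_cons]
    by_cases hx : t.foldl max x = x
    · simp [hx]; ring
    · have hgt : x < t.foldl max x := lt_of_le_of_ne (PySem.List.le_foldl_max t x).1 (Ne.symm hx)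
      simp only [hx, if_false, beq_iff_eq]
      rw [if_neg hgt.ne]; simp

-- the nested i/j loops of A fold the step over exactly B's flattened cell list
theorem pvNested_eq_flat (board : List (List Int)) :
    get_max_cell_value_and_count_from_board board =
      ((List.range board.length).flatMap (fun i =>
        (List.range board.length).map (fun j => (board.getD i []).getD j 0))).foldl pvStepA (none, 0) := by
  unfold get_max_cell_value_and_count_from_board
  rw [List.foldl_flatMap]
  congr 1
  funext st i
  rw [List.foldl_map]

-- ===== VERDICT (by name: the statement is the Claim_ definition above) =====
theorem get_max_cell_value_and_count_from_board_spec : Claim_equal_get_max_cell_value_and_count_from_board := by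
  intro board _ _
  unfold Spec_get_max_cell_value_and_count_from_board get_max_cell_value_and_count_from_board_alt
  rw [pvNested_eq_flat, pvStepA_foldl]
  simp [PySem.List.count]
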